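-- pv_equiv track=rewrite | github.com/sciurid/gm-study | gmutil/calc.py | _lucas_quick
-- ===== SOURCE A (Python) =====
-- def _lucas_quick(p, x, y, k):
--     """生成Lucas序列的U mod p和V mod p
--
--     GB/T 32918.1-2016 B.1.3 (P29)
--     """
--     delta = x ** 2 - 4 * y
--     r = k.bit_length() - 1
--     u = 1
--     v = x
--
--     for i in range(r - 1, -1, -1):
--         u, v = (u * v), ((v ** 2 + u ** 2 * delta) // 2)
--         if k & (0x01 << i) != 0:
--             u, v = (x * u + v) // 2, (x * v + delta * u) // 2
--     return u % p, v % p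
-- ===== SOURCE B (Python) =====
-- def _lucas_quick(p, x, y, k):
--     """Lucas sequence U mod p and V mod p.
--
--     Fast doubling on the pair (U_n, U_{n+1}) instead of (U_n, V_n):
--     U_{2n} = U_n*(2*U_{n+1} - x*U_n), U_{2n+1} = U_{n+1}**2 - y*U_n**2,
--     and a step U_{n+1}, x*U_{n+1} - y*U_n for a set bit.  These formulas
--     need no division, so every intermediate is reduced modulo p at once
--     and V_k is recovered at the end as 2*U_{k+1} - x*U_k.
--     """
--     a, b = 1 % p, x % p  # (U_1, U_2) mod p; U_2 = x
--     for i in range(k.bit_length() - 2, -1, -1):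
--         a, b = a * (2 * b - x * a) % p, (b * b - y * a * a) % p
--         if k & (1 << i):
--             a, b = b, (x * b - y * a) % p
--     return a, (2 * b - x * a) % p
-- ===== Notes on version B (the rewrite author's own statement) =====
-- stated objective: faster
-- what changed: B replaces A's (U,V) doubling chain with exact floor-halvings by division-free fast doubling on the pair (U_n, U_{n+1}) — U_2n = U_n(2U_{n+1}-xU_n), U_2n+1 = U_{n+1}^2 - yU_n^2 — reduced mod p at every step, recovering V_k = 2U_{k+1} - xU_k at the end, so intermediates stay O(log p) bits instead of growing exponentially.
import Mathlib
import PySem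

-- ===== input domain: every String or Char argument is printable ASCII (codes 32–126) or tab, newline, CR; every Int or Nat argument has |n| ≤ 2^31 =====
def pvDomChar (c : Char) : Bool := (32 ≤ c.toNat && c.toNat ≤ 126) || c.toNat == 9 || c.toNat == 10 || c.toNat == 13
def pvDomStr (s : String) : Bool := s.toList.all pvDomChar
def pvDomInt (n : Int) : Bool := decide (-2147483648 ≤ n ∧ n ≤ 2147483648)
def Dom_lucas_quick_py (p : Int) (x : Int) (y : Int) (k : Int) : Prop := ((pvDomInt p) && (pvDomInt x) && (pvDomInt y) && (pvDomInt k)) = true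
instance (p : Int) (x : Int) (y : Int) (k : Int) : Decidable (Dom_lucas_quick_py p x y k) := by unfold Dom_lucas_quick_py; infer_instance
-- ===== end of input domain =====

-- B replaces A's (U,V) doubling with exact floor-halvings by division-free fast
-- doubling on the pair (U_n, U_{n+1}), reduced mod p at every step (faster: the
-- intermediates stay small where A's grow exponentially); proved equal for p ≠ 0.


-- ===== PORT A =====
-- loop body of A; i.toNat is exact: every i produced by range(r-1, -1, -1) is ≥ 0
def pvStepA (delta x k : Int) (s : Int × Int) (i : Int) : Int × Int :=
  let u := s.1 * s.2
  let v := PySem.Int.floordiv (s.2 ^ 2 + s.1 ^ 2 * delta) 2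
  if PySem.Int.band k (1 <<< i.toNat) ≠ 0 then
    (PySem.Int.floordiv (x * u + v) 2, PySem.Int.floordiv (x * v + delta * u) 2)
  else (u, v)

def lucas_quick_py (p : Int) (x : Int) (y : Int) (k : Int) : Int × Int :=
  let delta := x ^ 2 - 4 * y
  let r : Int := (PySem.Int.bitLength k : Int) - 1
  let s := (PySem.List.pyRange (r - 1) (-1) (-1)).foldl (pvStepA delta x k) (1, x)
  (PySem.Int.mod s.1 p, PySem.Int.mod s.2 p)

-- ===== PORT B =====
-- loop body of B: fast doubling on (U_n, U_{n+1}), each result reduced mod p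
def pvStepB (p x y k : Int) (s : Int × Int) (i : Int) : Int × Int :=
  let a := PySem.Int.mod (s.1 * (2 * s.2 - x * s.1)) p
  let b := PySem.Int.mod (s.2 * s.2 - y * s.1 * s.1) p
  if PySem.Int.band k (1 <<< i.toNat) ≠ 0 then
    (b, PySem.Int.mod (x * b - y * a) p)
  else (a, b)

def lucas_quick_py_alt (p : Int) (x : Int) (y : Int) (k : Int) : Int × Int :=
  let s := (PySem.List.pyRange ((PySem.Int.bitLength k : Int) - 2) (-1) (-1)).foldl
             (pvStepB p x y k) (PySem.Int.mod 1 p, PySem.Int.mod x p)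
  (s.1, PySem.Int.mod (2 * s.2 - x * s.1) p)

-- ===== PRECONDITION & SPEC =====
-- Pre_ excludes exactly p = 0, where A raises ZeroDivisionError at `u % p` (and B likewise).
def Pre_lucas_quick_py (p : Int) (x : Int) (y : Int) (k : Int) : Prop := p ≠ 0
instance (p : Int) (x : Int) (y : Int) (k : Int) : Decidable (Pre_lucas_quick_py p x y k) := by unfold Pre_lucas_quick_py; infer_instance
def pvWitness_lucas_quick_py : Int × Int × Int × Int := (7, 3, 2, 5)

def Spec_lucas_quick_py (p : Int) (x : Int) (y : Int) (k : Int) (out : Int × Int) : Prop := out = lucas_quick_py_alt p x y k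
instance (p : Int) (x : Int) (y : Int) (k : Int) (out : Int × Int) : Decidable (Spec_lucas_quick_py p x y k out) := by unfold Spec_lucas_quick_py; infer_instance

-- ===== CLAIM (what is proved, stated in full; the proofs are below) =====
def Claim_equal_lucas_quick_py : Prop := ∀ (p : Int) (x : Int) (y : Int) (k : Int), Dom_lucas_quick_py p x y k → Pre_lucas_quick_py p x y k → Spec_lucas_quick_py p x y k (lucas_quick_py p x y k)

-- ===== LEMMAS AND PROOFS =====

-- ghost chain: B's fast-doubling step over exact integers (no reduction)
def pvGhost (x y k : Int) (s : Int × Int) (i : Int) : Int × Int :=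
  let a := s.1 * (2 * s.2 - x * s.1)
  let b := s.2 * s.2 - y * s.1 * s.1
  if PySem.Int.band k (1 <<< i.toNat) ≠ 0 then (b, x * b - y * a) else (a, b)

lemma floordiv_two_double (t : Int) : PySem.Int.floordiv (2 * t) 2 = t := by
  rw [PySem.Int.floordiv_eq_ediv_of_pos (by norm_num)]
  exact Int.mul_ediv_cancel_left t (by norm_num)

-- one A-step on the image (a, 2b − xa) of a ghost state is the image of one ghost step
lemma stepA_ghost (x y k : Int) (a b i : Int) :
    pvStepA (x ^ 2 - 4 * y) x k (a, 2 * b - x * a) i =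
      ((pvGhost x y k (a, b) i).1,
       2 * (pvGhost x y k (a, b) i).2 - x * (pvGhost x y k (a, b) i).1) := by
  simp only [pvStepA, pvGhost]
  have e1 : (2 * b - x * a) ^ 2 + a ^ 2 * (x ^ 2 - 4 * y)
      = 2 * (2 * (b * b - y * a * a) - x * (a * (2 * b - x * a))) := by ring
  split_ifs with h
  · simp only [Prod.mk.injEq]
    constructor
    · have e2 : x * (a * (2 * b - x * a)) +
          PySem.Int.floordiv ((2 * b - x * a) ^ 2 + a ^ 2 * (x ^ 2 - 4 * y)) 2
          = 2 * (b * b - y * a * a) := by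
        rw [e1, floordiv_two_double]; ring
      rw [e2, floordiv_two_double]
    · have e3 : x * PySem.Int.floordiv ((2 * b - x * a) ^ 2 + a ^ 2 * (x ^ 2 - 4 * y)) 2 +
          (x ^ 2 - 4 * y) * (a * (2 * b - x * a))
          = 2 * (2 * (x * (b * b - y * a * a) - y * (a * (2 * b - x * a)))
                 - x * (b * b - y * a * a)) := by
        rw [e1, floordiv_two_double]; ring
      rw [e3, floordiv_two_double]
  · rw [e1, floordiv_two_double]

-- folding A's step from the image of a ghost state stays the image of the ghost fold
lemma foldA_ghost (x y k : Int) :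
    ∀ (L : List Int) (a b : Int),
      L.foldl (pvStepA (x ^ 2 - 4 * y) x k) (a, 2 * b - x * a) =
        ((L.foldl (pvGhost x y k) (a, b)).1,
         2 * (L.foldl (pvGhost x y k) (a, b)).2 - x * (L.foldl (pvGhost x y k) (a, b)).1) := by
  intro L
  induction L with
  | nil => intro a b; simp [List.foldl_nil]
  | cons i L ih =>
    intro a b
    simp only [List.foldl_cons]
    rw [stepA_ghost]
    rcases h : pvGhost x y k (a, b) i with ⟨a2, b2⟩
    simpa using ih a2 b2

-- Python's a % m is congruent to a modulo m (for every m).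
lemma pymod_modeq (a m : Int) : PySem.Int.mod a m ≡ a [ZMOD m] := by
  have h := PySem.Int.floordiv_mul_add_mod a m
  have : m ∣ a - PySem.Int.mod a m := ⟨PySem.Int.floordiv a m, by linarith [h]⟩
  exact Int.modEq_iff_dvd.mpr this

-- two integers congruent modulo p have the same Python p-remainder
lemma pymod_eq_of_modeq {p a b : Int} (hp : p ≠ 0) (h : a ≡ b [ZMOD p]) :
    PySem.Int.mod a p = PySem.Int.mod b p := by
  have hmod : PySem.Int.mod a p ≡ PySem.Int.mod b p [ZMOD p] :=
    ((pymod_modeq a p).trans h).trans (pymod_modeq b p).symm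
  have hd : p ∣ PySem.Int.mod b p - PySem.Int.mod a p := Int.ModEq.dvd hmod
  rcases lt_or_gt_of_ne hp with hneg | hpos
  · have ha := PySem.Int.mod_neg_bounds a (b := p) hneg
    have hb := PySem.Int.mod_neg_bounds b (b := p) hneg
    rcases hd with ⟨t, ht⟩
    have ht0 : t = 0 := by nlinarith [ha.1, ha.2, hb.1, hb.2]
    rw [ht0, mul_zero] at ht
    omega
  · have ha1 := PySem.Int.mod_nonneg a (b := p) hpos
    have ha2 := PySem.Int.mod_lt a (b := p) hpos
    have hb1 := PySem.Int.mod_nonneg b (b := p) hpos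
    have hb2 := PySem.Int.mod_lt b (b := p) hpos
    rcases hd with ⟨t, ht⟩
    have ht0 : t = 0 := by nlinarith
    rw [ht0, mul_zero] at ht
    omega

-- B's reduced fold tracks the ghost fold componentwise mod p, and its components
-- are Python p-remainders of something
lemma foldB_ghost (p x y k : Int) :
    ∀ (L : List Int) (s t : Int × Int),
      (∃ c, s.1 = PySem.Int.mod c p) → (∃ c, s.2 = PySem.Int.mod c p) →
      s.1 ≡ t.1 [ZMOD p] → s.2 ≡ t.2 [ZMOD p] →
      (∃ c, (L.foldl (pvStepB p x y k) s).1 = PySem.Int.mod c p) ∧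
      (∃ c, (L.foldl (pvStepB p x y k) s).2 = PySem.Int.mod c p) ∧
      (L.foldl (pvStepB p x y k) s).1 ≡ (L.foldl (pvGhost x y k) t).1 [ZMOD p] ∧
      (L.foldl (pvStepB p x y k) s).2 ≡ (L.foldl (pvGhost x y k) t).2 [ZMOD p] := by
  intro L
  induction L with
  | nil =>
    intro s t he1 he2 h1 h2
    exact ⟨he1, he2, h1, h2⟩
  | cons i L ih =>
    intro s t he1 he2 h1 h2
    simp only [List.foldl_cons]
    have ha : PySem.Int.mod (s.1 * (2 * s.2 - x * s.1)) p ≡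
        t.1 * (2 * t.2 - x * t.1) [ZMOD p] :=
      (pymod_modeq _ p).trans
        (h1.mul ((Int.ModEq.rfl.mul h2).sub (Int.ModEq.rfl.mul h1)))
    have hb : PySem.Int.mod (s.2 * s.2 - y * s.1 * s.1) p ≡
        t.2 * t.2 - y * t.1 * t.1 [ZMOD p] :=
      (pymod_modeq _ p).trans
        ((h2.mul h2).sub ((Int.ModEq.rfl.mul h1).mul h1))
    unfold pvStepB pvGhost
    simp only []
    split_ifs with h
    · apply ih
      · exact ⟨_, rfl⟩
      · exact ⟨_, rfl⟩
      · exact hb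
      · exact (pymod_modeq _ p).trans ((Int.ModEq.rfl.mul hb).sub (Int.ModEq.rfl.mul ha))
    · exact ih _ _ ⟨_, rfl⟩ ⟨_, rfl⟩ ha hb

-- ===== VERDICT (by name: the statement is the Claim_ definition above) =====
theorem lucas_quick_py_spec : Claim_equal_lucas_quick_py := by
  intro p x y k _ hp
  unfold Spec_lucas_quick_py lucas_quick_py lucas_quick_py_alt
  dsimp only
  set bl := PySem.Int.bitLength k with hbl
  have hrange : ((bl : Int) - 1) - 1 = (bl : Int) - 2 := by ring
  rw [hrange]
  set L := PySem.List.pyRange ((bl : Int) - 2) (-1) (-1) with hL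
  have hstart : ((1 : Int), x) = ((1 : Int), 2 * x - x * 1) := by ring_nf
  rw [hstart, foldA_ghost x y k L 1 x]
  set g := L.foldl (pvGhost x y k) (1, x) with hg
  obtain ⟨⟨c1, hc1⟩, ⟨c2, hc2⟩, hm1, hm2⟩ :=
    foldB_ghost p x y k L (PySem.Int.mod 1 p, PySem.Int.mod x p) (1, x)
      ⟨1, rfl⟩ ⟨x, rfl⟩ (pymod_modeq 1 p) (pymod_modeq x p)
  set sB := L.foldl (pvStepB p x y k) (PySem.Int.mod 1 p, PySem.Int.mod x p) with hsB
  have h1 : PySem.Int.mod g.1 p = sB.1 := by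
    rw [hc1]
    exact (pymod_eq_of_modeq hp (((pymod_modeq c1 p).symm.trans (hc1 ▸ hm1)) : c1 ≡ g.1 [ZMOD p])).symm
  have h2 : PySem.Int.mod (2 * g.2 - x * g.1) p = PySem.Int.mod (2 * sB.2 - x * sB.1) p :=
    pymod_eq_of_modeq hp
      (((Int.ModEq.rfl.mul hm2).sub (Int.ModEq.rfl.mul hm1)).symm)
  exact Prod.ext_iff.mpr ⟨h1, h2⟩
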